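-- pv_equiv track=rewrite | github.com/lucasvtiradentes/md-align | src/mdalign/checks/def_lists.py | _find_colon_sep
-- ===== SOURCE A (Python) =====
-- def _find_colon_sep(text):
--     in_backtick = False
--     for i, c in enumerate(text):
--         if c == "`":
--             in_backtick = not in_backtick
--         elif c == ":" and not in_backtick and i + 1 < len(text) and text[i + 1] == " ":
--             return i
--     return -1
-- ===== SOURCE B (Python) =====
-- def _find_colon_sep(text):
--     pos = 0
--     for idx, seg in enumerate(text.split("`")):
--         if idx % 2 == 0:
--             j = seg.find(": ")
--             if j != -1:
--                 return pos + j
--         pos += len(seg) + 1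
--     return -1
-- ===== Notes on version B (the rewrite author's own statement) =====
-- stated objective: faster
-- what changed: Replaces the char-by-char scan with an in_backtick flag by splitting the text on backticks and running a substring search for the colon-space separator only over the even-indexed (outside-backtick) segments, tracking a running offset.
import Mathlib
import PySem

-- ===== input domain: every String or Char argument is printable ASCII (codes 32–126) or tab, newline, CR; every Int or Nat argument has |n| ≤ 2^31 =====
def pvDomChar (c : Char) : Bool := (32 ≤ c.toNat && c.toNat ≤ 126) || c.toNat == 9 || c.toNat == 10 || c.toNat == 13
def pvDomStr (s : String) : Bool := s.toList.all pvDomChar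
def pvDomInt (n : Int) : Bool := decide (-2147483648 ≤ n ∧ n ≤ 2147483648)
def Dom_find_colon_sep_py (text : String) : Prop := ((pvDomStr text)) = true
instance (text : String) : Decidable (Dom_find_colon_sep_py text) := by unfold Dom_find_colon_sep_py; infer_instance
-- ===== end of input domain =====

-- B replaces the stateful character scan with split-on-backtick + substring search in even segments (same O(n), measured faster via C-level str.split/str.find).


-- ===== PORT A =====
-- the for-loop over enumerate(text) with the in_backtick flag; text[i+1] is a lookup into the full string
def find_colon_sep_py_go (text : List Char) : List (Int × Char) → Bool → Int
  | [], _ => -1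
  | (i, c) :: rest, inb =>
    if c = '`' then find_colon_sep_py_go text rest (!inb)
    else if c = ':' ∧ inb = false ∧ i + 1 < (text.length : Int) ∧
            PySem.List.pyGet? text (i + 1) = some ' ' then i
    else find_colon_sep_py_go text rest inb

def find_colon_sep_py (text : String) : Int :=
  find_colon_sep_py_go text.toList (PySem.List.enumerate text.toList 0) false

-- ===== PORT B =====
-- text.split("`") for the one-character separator "`": exact transliteration of Python's str.split there
def pvSplitChar (sep : Char) : List Char → List (List Char)
  | [] => [[]]
  | c :: rest =>
    match pvSplitChar sep rest with
    | [] => [[]]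
    | s :: ss => if c = sep then [] :: s :: ss else (c :: s) :: ss

-- the for-loop of B over enumerate(text.split("`")) with the running offset pos
def find_colon_sep_py_alt_go : List (List Char) → Nat → Int → Int
  | [], _, _ => -1
  | seg :: rest, idx, pos =>
    if idx % 2 = 0 then
      let j := PySem.Chars.find seg [':', ' ']
      if j ≠ -1 then pos + j
      else find_colon_sep_py_alt_go rest (idx + 1) (pos + seg.length + 1)
    else find_colon_sep_py_alt_go rest (idx + 1) (pos + seg.length + 1)

def find_colon_sep_py_alt (text : String) : Int :=
  find_colon_sep_py_alt_go (pvSplitChar '`' text.toList) 0 0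

-- ===== PRECONDITION & SPEC =====
def Spec_find_colon_sep_py (text : String) (out : Int) : Prop := out = find_colon_sep_py_alt text
instance (text : String) (out : Int) : Decidable (Spec_find_colon_sep_py text out) := by unfold Spec_find_colon_sep_py; infer_instance

-- ===== CLAIM (what is proved, stated in full; the proofs are below) =====
def Claim_equal_find_colon_sep_py : Prop := ∀ (text : String), Dom_find_colon_sep_py text → Spec_find_colon_sep_py text (find_colon_sep_py text)

-- ===== LEMMAS AND PROOFS =====

-- index-free form of A's scan: position as a Nat, lookahead as head? of the remaining suffix
def pvScan : List Char → Nat → Bool → Int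
  | [], _, _ => -1
  | c :: rest, pos, b =>
    if c = '`' then pvScan rest (pos + 1) (!b)
    else if c = ':' ∧ b = false ∧ rest.head? = some ' ' then (pos : Int)
    else pvScan rest (pos + 1) b

-- first index j of a segment with seg[j] = ':' and seg[j+1] = ' '
def pvFirstCS : List Char → Option Nat
  | [] => none
  | c :: rest =>
    if c = ':' ∧ rest.head? = some ' ' then some 0
    else (pvFirstCS rest).map (· + 1)

theorem pvScan_eq_go (text : String) :
    ∀ (suf : List Char) (k : Nat) (b : Bool), suf = text.toList.drop k →
      find_colon_sep_py_go text.toList (PySem.List.enumerate suf (k : Int)) b = pvScan suf k b := by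
  intro suf
  induction suf with
  | nil => intro k b _; simp [PySem.List.enumerate, find_colon_sep_py_go, pvScan]
  | cons c rest ih =>
    intro k b hsuf
    have hk : k < text.toList.length := by
      by_contra hge
      rw [List.drop_eq_nil_of_le (by omega)] at hsuf
      simp at hsuf
    have hrest : rest = text.toList.drop (k + 1) := by
      rw [← List.tail_drop, ← hsuf]
      rfl
    have hget : PySem.List.pyGet? text.toList ((k : Int) + 1) = text.toList[k + 1]? := by
      rw [show ((k : Int) + 1) = ((k + 1 : Nat) : Int) by push_cast; ring, PySem.List.pyGet?_natCast]
    have hhead : text.toList[k + 1]? = rest.head? := by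
      rw [← List.head?_drop, ← hrest]
    have hlen : text.toList.length = k + 1 + rest.length := by
      have h2 := congrArg List.length hsuf
      rw [List.length_drop] at h2
      simp only [List.length_cons] at h2
      omega
    rw [PySem.List.enumerate_cons]
    simp only [find_colon_sep_py_go, pvScan]
    by_cases hc : c = '`'
    · rw [if_pos hc, if_pos hc,
        show (k : Int) + 1 = ((k + 1 : Nat) : Int) by push_cast; ring, ih (k + 1) (!b) hrest]
    · rw [if_neg hc, if_neg hc]
      by_cases hm : c = ':' ∧ b = false ∧ rest.head? = some ' '
      · have hne : rest ≠ [] := by intro h0; rw [h0] at hm; simp at hm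
        have : (k : Int) + 1 < (text.toList.length : Int) := by
          have : rest.length ≠ 0 := by simpa using hne
          omega
        rw [if_pos ⟨hm.1, hm.2.1, this, by rw [hget, hhead]; exact hm.2.2⟩, if_pos hm]
      · rw [if_neg hm, if_neg ?hne,
          show (k : Int) + 1 = ((k + 1 : Nat) : Int) by push_cast; ring, ih (k + 1) b hrest]
        case hne =>
          intro hx
          refine hm ⟨hx.1, hx.2.1, ?_⟩
          rw [← hhead, ← hget]
          exact hx.2.2.2

theorem pvPrefixCons {c : Char} {rest : List Char} (hp : [':', ' '] <+: (c :: rest)) :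
    c = ':' ∧ rest.head? = some ' ' := by
  obtain ⟨t, ht⟩ := hp
  cases rest with
  | nil => simp at ht
  | cons d r =>
    simp only [List.cons_append, List.nil_append, List.cons.injEq] at ht
    exact ⟨ht.1.symm, by simp [ht.2.1.symm]⟩

theorem pvFirstCS_none (seg : List Char) (h : pvFirstCS seg = none) :
    ∀ j, ¬ ([':', ' '] <+: seg.drop j) := by
  induction seg with
  | nil => intro j; simp
  | cons c rest ih =>
    simp only [pvFirstCS] at h
    by_cases hc : c = ':' ∧ rest.head? = some ' '
    · rw [if_pos hc] at h; exact absurd h (by simp)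
    · rw [if_neg hc, Option.map_eq_none_iff] at h
      intro j
      cases j with
      | zero => intro hp; exact hc (pvPrefixCons hp)
      | succ j' => simpa using ih h j'

theorem pvFirstCS_some (seg : List Char) (j : Nat) (h : pvFirstCS seg = some j) :
    ([':', ' '] <+: seg.drop j) ∧ ∀ i < j, ¬ ([':', ' '] <+: seg.drop i) := by
  induction seg generalizing j with
  | nil => simp [pvFirstCS] at h
  | cons c rest ih =>
    simp only [pvFirstCS] at h
    by_cases hc : c = ':' ∧ rest.head? = some ' '
    · rw [if_pos hc] at h
      obtain ⟨hc1, hc2⟩ := hc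
      have hj : j = 0 := by simpa using h.symm
      subst hj
      refine ⟨?_, by intro i hi; omega⟩
      cases rest with
      | nil => simp at hc2
      | cons d r =>
        simp only [List.head?_cons, Option.some.injEq] at hc2
        subst hc1; subst hc2
        simp
    · rw [if_neg hc] at h
      cases hfr : pvFirstCS rest with
      | none => simp [hfr] at h
      | some j' =>
        rw [hfr] at h
        simp only [Option.map_some, Option.some.injEq] at h
        obtain ⟨hp, hmin⟩ := ih j' hfr
        refine ⟨by rw [← h]; simpa using hp, ?_⟩
        intro i hi
        cases i with
        | zero => intro hpre; exact hc (pvPrefixCons hpre)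
        | succ i' => simpa using hmin i' (by omega)

theorem pvFind_eq_firstCS (seg : List Char) :
    PySem.Chars.find seg [':', ' '] =
      match pvFirstCS seg with
      | some j => (j : Int)
      | none => -1 := by
  cases hf : pvFirstCS seg with
  | none =>
    rw [(PySem.Chars.find_eq_neg_one_iff seg [':', ' ']).mpr]
    intro hinf
    have hin : PySem.Chars.isIn [':', ' '] seg = true := (PySem.Chars.isIn_iff_infix _ _).mpr hinf
    obtain ⟨jj, hjj⟩ := (PySem.Chars.exists_prefix_drop_iff_isIn [':', ' '] seg).mpr hin
    exact pvFirstCS_none seg hf jj hjj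
  | some j =>
    obtain ⟨hp, hmin⟩ := pvFirstCS_some seg j hf
    have hinf : [':', ' '] <:+: seg := by
      obtain ⟨t, ht⟩ := hp
      exact ⟨seg.take j, t, by rw [List.append_assoc, ht, List.take_append_drop]⟩
    have hpos : 0 ≤ PySem.Chars.find seg [':', ' '] := (PySem.Chars.find_nonneg_iff _ _).mpr hinf
    obtain ⟨hp2, hmin2⟩ := PySem.Chars.find_spec hpos
    have htn : (PySem.Chars.find seg [':', ' ']).toNat = j := by
      rcases lt_trichotomy (PySem.Chars.find seg [':', ' ']).toNat j with hlt | heq | hgt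
      · exact absurd hp2 (hmin _ hlt)
      · exact heq
      · exact absurd hp (hmin2 _ hgt)
    show PySem.Chars.find seg [':', ' '] = (j : Int)
    omega

theorem pvScan_even (seg : List Char) :
    ∀ (tail : List Char) (pos : Nat), '`' ∉ seg → (tail = [] ∨ tail.head? = some '`') →
      pvScan (seg ++ tail) pos false =
        match pvFirstCS seg with
        | some j => ((pos + j : Nat) : Int)
        | none => pvScan tail (pos + seg.length) false := by
  induction seg with
  | nil =>
    intro tail pos _ _
    simp [pvFirstCS]
  | cons c rest ih =>
    intro tail pos h htail
    simp only [List.mem_cons, not_or] at h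
    have hc : ¬ c = '`' := fun hcc => h.1 hcc.symm
    simp only [List.cons_append, pvScan, if_neg hc]
    by_cases hm : c = ':' ∧ (rest ++ tail).head? = some ' '
    · -- the scan matches at this position; so does pvFirstCS
      have hr : rest.head? = some ' ' := by
        cases rest with
        | cons d r => simpa using hm.2
        | nil =>
          exfalso
          rcases htail with h0 | h0
          · subst h0; simp at hm
          · rw [List.nil_append] at hm; rw [hm.2] at h0; simp at h0
      rw [if_pos ⟨hm.1, trivial, hm.2⟩]
      simp [pvFirstCS, hm.1, hr]
    · have hm' : ¬ (c = ':' ∧ True ∧ (rest ++ tail).head? = some ' ') := by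
        intro hx; exact hm ⟨hx.1, hx.2.2⟩
      rw [if_neg hm']
      have hfc : ¬ (c = ':' ∧ rest.head? = some ' ') := by
        intro hx
        refine hm ⟨hx.1, ?_⟩
        cases rest with
        | nil => simp at hx
        | cons d r => simpa using hx.2
      rw [ih tail (pos + 1) h.2 htail]
      simp only [pvFirstCS, if_neg hfc]
      cases hfr : pvFirstCS rest with
      | none => simp only [Option.map_none]; congr 1; simp; omega
      | some j => simp only [Option.map_some]; congr 1; omega

theorem pvScan_odd (seg : List Char) :
    ∀ (tail : List Char) (pos : Nat), '`' ∉ seg →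
      pvScan (seg ++ tail) pos true = pvScan tail (pos + seg.length) true := by
  induction seg with
  | nil => intro tail pos _; simp
  | cons c rest ih =>
    intro tail pos h
    simp only [List.mem_cons, not_or] at h
    have hc : ¬ c = '`' := fun hcc => h.1 hcc.symm
    simp only [List.cons_append, pvScan, if_neg hc]
    have hne : ¬ (c = ':' ∧ true = false ∧ (rest ++ tail).head? = some ' ') := by simp
    rw [if_neg hne, ih tail (pos + 1) h.2,
        show pos + 1 + rest.length = pos + (c :: rest).length by simp; omega]

theorem pvSplitChar_ne_nil (sep : Char) (xs : List Char) : pvSplitChar sep xs ≠ [] := by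
  induction xs with
  | nil => simp [pvSplitChar]
  | cons d r ihr =>
    simp only [pvSplitChar]
    cases hr : pvSplitChar sep r with
    | nil => exact absurd hr ihr
    | cons s ss => split_ifs <;> simp

theorem pvSplitChar_no_sep (sep : Char) (seg : List Char) (h : sep ∉ seg) :
    pvSplitChar sep seg = [seg] := by
  induction seg with
  | nil => rfl
  | cons c rest ih =>
    simp only [List.mem_cons, not_or] at h
    have hc : ¬ c = sep := fun hcc => h.1 hcc.symm
    simp [pvSplitChar, ih h.2, hc]

theorem pvSplitChar_append (sep : Char) (seg rest : List Char) (h : sep ∉ seg) :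
    pvSplitChar sep (seg ++ sep :: rest) = seg :: pvSplitChar sep rest := by
  induction seg with
  | nil =>
    simp only [List.nil_append, pvSplitChar]
    cases hs : pvSplitChar sep rest with
    | nil => exact absurd hs (pvSplitChar_ne_nil sep rest)
    | cons s ss => simp
  | cons c seg' ih =>
    simp only [List.mem_cons, not_or] at h
    have hc : ¬ c = sep := fun hcc => h.1 hcc.symm
    simp only [List.cons_append, pvSplitChar, ih h.2, if_neg hc]

theorem pvDecomp (xs : List Char) (h : '`' ∈ xs) :
    ∃ seg rest, xs = seg ++ '`' :: rest ∧ '`' ∉ seg ∧ rest.length < xs.length := by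
  induction xs with
  | nil => simp at h
  | cons c t ih =>
    by_cases hc : c = '`'
    · exact ⟨[], t, by simp [hc], by simp, by simp⟩
    · have ht : '`' ∈ t := (List.mem_cons.mp h).resolve_left (fun h1 => hc h1.symm)
      obtain ⟨seg, rest, hx, hns, hlt⟩ := ih ht
      exact ⟨c :: seg, rest, by simp [hx], by simp [hns]; exact fun h1 => hc h1.symm, by simp; omega⟩

theorem pvMain : ∀ (n : Nat) (xs : List Char), xs.length ≤ n → ∀ (idx pos : Nat),
    pvScan xs pos (decide (idx % 2 = 1)) = find_colon_sep_py_alt_go (pvSplitChar '`' xs) idx (pos : Int) := by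
  intro n
  induction n with
  | zero =>
    intro xs hlen idx pos
    have hx : xs = [] := List.eq_nil_of_length_eq_zero (by omega)
    subst hx
    by_cases hp : idx % 2 = 0
    · simp [pvSplitChar, pvScan, find_colon_sep_py_alt_go, hp, pvFind_eq_firstCS, pvFirstCS]
    · simp [pvSplitChar, pvScan, find_colon_sep_py_alt_go, hp]
  | succ n ihn =>
    intro xs hlen idx pos
    by_cases hmem : '`' ∈ xs
    · obtain ⟨seg, rest, hx, hns, hlt⟩ := pvDecomp xs hmem
      subst hx
      rw [pvSplitChar_append '`' seg rest hns]
      by_cases hp : idx % 2 = 0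
      · have hb : decide (idx % 2 = 1) = false := by simp; omega
        rw [hb, pvScan_even seg ('`' :: rest) pos hns (Or.inr (by simp))]
        simp only [find_colon_sep_py_alt_go, if_pos hp, pvFind_eq_firstCS]
        cases hf : pvFirstCS seg with
        | some j => simp
        | none =>
          simp only [ne_eq, not_true_eq_false, if_false]
          have h1 : pvScan ('`' :: rest) (pos + seg.length) false =
              pvScan rest (pos + seg.length + 1) true := by simp [pvScan]
          rw [h1]
          have hb2 : decide ((idx + 1) % 2 = 1) = true := by simp; omega
          have := ihn rest (by simp at hlen; omega) (idx + 1) (pos + seg.length + 1)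
          rw [hb2] at this
          rw [this]
          congr 1
      · have hb : decide (idx % 2 = 1) = true := by simp; omega
        rw [hb, pvScan_odd seg ('`' :: rest) pos hns]
        have h1 : pvScan ('`' :: rest) (pos + seg.length) true =
            pvScan rest (pos + seg.length + 1) false := by simp [pvScan]
        rw [h1]
        simp only [find_colon_sep_py_alt_go, if_neg hp]
        have hb2 : decide ((idx + 1) % 2 = 1) = false := by simp; omega
        have := ihn rest (by simp at hlen; omega) (idx + 1) (pos + seg.length + 1)
        rw [hb2] at this
        rw [this]
        congr 1
    · rw [pvSplitChar_no_sep '`' xs hmem]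
      by_cases hp : idx % 2 = 0
      · have hb : decide (idx % 2 = 1) = false := by simp; omega
        have he := pvScan_even xs [] pos hmem (Or.inl rfl)
        rw [List.append_nil] at he
        rw [hb, he]
        simp only [find_colon_sep_py_alt_go, if_pos hp, pvFind_eq_firstCS]
        cases hf : pvFirstCS xs with
        | some j => simp
        | none => simp [pvScan]
      · have hb : decide (idx % 2 = 1) = true := by simp; omega
        have ho := pvScan_odd xs [] pos hmem
        rw [List.append_nil] at ho
        rw [hb, ho]
        simp [pvScan, find_colon_sep_py_alt_go, hp]

-- ===== VERDICT (by name: the statement is the Claim_ definition above) =====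
theorem find_colon_sep_py_spec : Claim_equal_find_colon_sep_py := by
  intro text _
  unfold Spec_find_colon_sep_py find_colon_sep_py find_colon_sep_py_alt
  have h0 := pvScan_eq_go text text.toList 0 false (by simp)
  have h1 := pvMain text.toList.length text.toList le_rfl 0 0
  simpa using h0.trans (by simpa using h1)
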